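-- pv_equiv track=rewrite | github.com/akwodkiewicz/advent-of-code | 2020/21.py | part_one
-- ===== SOURCE A (Python) =====
-- from functools import reduce
-- from itertools import product, starmap, chain
--
-- def part_one(data):
--     flat_ingredients = list(chain.from_iterable(tup[0] for tup in data))
--     unique_ingredients = set(flat_ingredients)
--     unique_allergens = set(chain.from_iterable(tup[1] for tup in data))
--     allergenic_ingredients = {allergen: [] for allergen in unique_allergens}
--
--     for allergen in unique_allergens:
--         candidates = []
--         for food_ingredients, food_allergens in data:
--             if allergen not in food_allergens:
--                 continue
--             candidates.append(set(food_ingredients))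
--         allergenic_ingredients[allergen] = reduce(set.intersection, candidates)
--
--     suspicious_ingredients = set(chain.from_iterable(v for v in allergenic_ingredients.values()))
--     safe_ingredients = unique_ingredients.difference(suspicious_ingredients)
--     return sum([1 for i in flat_ingredients if i in safe_ingredients]), allergenic_ingredients
-- ===== SOURCE B (Python) =====
-- def part_one(data):
--     candidates = {}
--     for food_ingredients, food_allergens in data:
--         ingredient_set = set(food_ingredients)
--         for allergen in food_allergens:
--             if allergen in candidates:
--                 candidates[allergen] &= ingredient_set
--             else:
--                 candidates[allergen] = set(ingredient_set)
--     suspicious = {i for v in candidates.values() for i in v}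
--     flat_ingredients = [i for food_ingredients, _ in data for i in food_ingredients]
--     safe = set(flat_ingredients) - suspicious
--     return sum(1 for i in flat_ingredients if i in safe), candidates
-- ===== Notes on version B (the rewrite author's own statement) =====
-- stated objective: faster
-- what changed: Replaces A's per-allergen rescan of all foods (collect candidate sets, then reduce by intersection) with a single pass over the foods that builds the allergen->candidate-set dict by intersecting in place as each food is seen.
import Mathlib
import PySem

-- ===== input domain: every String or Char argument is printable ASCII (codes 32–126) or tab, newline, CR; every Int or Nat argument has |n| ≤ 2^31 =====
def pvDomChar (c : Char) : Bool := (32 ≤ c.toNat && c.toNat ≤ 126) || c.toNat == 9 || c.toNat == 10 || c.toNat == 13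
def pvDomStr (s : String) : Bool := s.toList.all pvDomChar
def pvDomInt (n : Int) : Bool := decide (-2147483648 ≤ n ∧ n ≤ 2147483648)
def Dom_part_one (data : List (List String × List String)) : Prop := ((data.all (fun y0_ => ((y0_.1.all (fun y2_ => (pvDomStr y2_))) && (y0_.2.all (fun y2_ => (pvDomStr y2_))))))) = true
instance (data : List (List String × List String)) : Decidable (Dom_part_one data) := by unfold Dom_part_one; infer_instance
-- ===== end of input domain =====

-- B replaces A's per-allergen rescan of all foods with a single intersecting pass over the
-- foods (objective: faster).

-- ===== PORT A =====
-- reduce(set.intersection, candidates); the [] case is unreachable in A (every allergen that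
-- is iterated over occurs in at least one food, so candidates is nonempty).
def reduceInter (cs : List (PySem.Set String)) : PySem.Set String :=
  match cs with
  | [] => []
  | c :: rest => rest.foldl PySem.Set.inter c

def part_one (data : List (List String × List String)) : Int × (List (String × List String)) :=
  let flat_ingredients : List String := (data.map (fun tup => tup.1)).flatten
  let unique_ingredients : PySem.Set String := PySem.Set.ofList flat_ingredients
  let unique_allergens : PySem.Set String := PySem.Set.ofList ((data.map (fun tup => tup.2)).flatten)
  let d0 : PySem.Dict String (List String) :=
    unique_allergens.foldl (fun d allergen => d.insert allergen ([] : List String)) PySem.Dict.empty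
  let d : PySem.Dict String (List String) :=
    unique_allergens.foldl (fun d allergen =>
      d.insert allergen (reduceInter (data.foldl (fun cs p =>
        if p.2.contains allergen then cs ++ [PySem.Set.ofList p.1] else cs) []))) d0
  let suspicious : PySem.Set String := PySem.Set.ofList d.values.flatten
  let safe : PySem.Set String := PySem.Set.diff unique_ingredients suspicious
  (((flat_ingredients.filter (fun i => safe.contains i)).map (fun _ => (1 : Int))).sum, d.items)

-- ===== PORT B =====
def part_one_alt (data : List (List String × List String)) : Int × (List (String × List String)) :=
  let candidates : PySem.Dict String (List String) :=
    data.foldl (fun cand p =>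
      let ingredient_set : PySem.Set String := PySem.Set.ofList p.1
      p.2.foldl (fun cand allergen =>
        if cand.contains allergen then
          cand.insert allergen (PySem.Set.inter (cand.getD allergen []) ingredient_set)
        else
          cand.insert allergen ingredient_set) cand) PySem.Dict.empty
  let suspicious : PySem.Set String := PySem.Set.ofList candidates.values.flatten
  let flat_ingredients : List String := data.flatMap (fun p => p.1)
  let safe : PySem.Set String := PySem.Set.diff (PySem.Set.ofList flat_ingredients) suspicious
  (flat_ingredients.foldl (fun acc i => if safe.contains i then acc + 1 else acc) (0 : Int),
   candidates.items)

-- ===== PRECONDITION & SPEC =====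
def Spec_part_one (data : List (List String × List String)) (out : Int × (List (String × List String))) : Prop := out = part_one_alt data
instance (data : List (List String × List String)) (out : Int × (List (String × List String))) : Decidable (Spec_part_one data out) := by unfold Spec_part_one; infer_instance

-- ===== CLAIM (what is proved, stated in full; the proofs are below) =====
def Claim_equal_part_one : Prop := ∀ (data : List (List String × List String)), Dom_part_one data → Spec_part_one data (part_one data)

-- ===== LEMMAS AND PROOFS =====

-- The common characterisation of both allergen dicts: keys in first-occurrence order of the
-- flattened allergen lists, each mapped to the intersection of the ingredient sets of the
-- foods that list it (folded from the left, in food order).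
def allergensOf (data : List (List String × List String)) : List String :=
  PySem.Set.ofList ((data.map (fun tup => tup.2)).flatten)

def candVal (data : List (List String × List String)) (a : String) : PySem.Set String :=
  reduceInter ((data.filter (fun p => p.2.contains a)).map (fun p => PySem.Set.ofList p.1))

lemma inter_self (S : PySem.Set String) : PySem.Set.inter S S = S := by
  simp only [PySem.Set.inter]
  exact List.filter_eq_self.mpr (fun x hx => by simpa using hx)

lemma inter_inter_self (y S : PySem.Set String) :
    PySem.Set.inter (PySem.Set.inter y S) S = PySem.Set.inter y S := by
  simp only [PySem.Set.inter]
  rw [List.filter_filter]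
  simp

lemma map_noop (l : List (String × List String)) (F : (String × List String) → (String × List String))
    (h : ∀ q ∈ l, F q = q) : l.map F = l :=
  (List.map_congr_left h).trans (List.map_id _)

lemma reduceInter_snoc (cs : List (PySem.Set String)) (S : PySem.Set String) :
    reduceInter (cs ++ [S]) = if cs = [] then S else PySem.Set.inter (reduceInter cs) S := by
  cases cs with
  | nil => simp [reduceInter]
  | cons c t => simp [reduceInter, List.foldl_append]

lemma mem_allergens (data : List (List String × List String)) (a : String) :
    a ∈ allergensOf data ↔ ∃ p ∈ data, a ∈ p.2 := by
  simp only [allergensOf, PySem.Set.mem_ofList, List.mem_flatten, List.mem_map]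
  constructor
  · rintro ⟨l, ⟨p, hp, rfl⟩, hal⟩; exact ⟨p, hp, hal⟩
  · rintro ⟨p, hp, hal⟩; exact ⟨p.2, ⟨p, hp, rfl⟩, hal⟩

lemma allergensOf_append (data : List (List String × List String)) (p : List String × List String) :
    allergensOf (data ++ [p]) = PySem.Set.update (allergensOf data) p.2 := by
  simp only [allergensOf, List.map_append, List.map_cons, List.map_nil, List.flatten_append,
    List.flatten_cons, List.flatten_nil, List.append_nil]
  exact PySem.Set.ofList_append _ _

lemma candVal_append (data : List (List String × List String)) (p : List String × List String)
    (a : String) :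
    candVal (data ++ [p]) a =
      if a ∈ p.2 then
        (if a ∈ allergensOf data then PySem.Set.inter (candVal data a) (PySem.Set.ofList p.1)
         else PySem.Set.ofList p.1)
      else candVal data a := by
  unfold candVal
  rw [List.filter_append]
  by_cases hp : a ∈ p.2
  · rw [if_pos hp]
    have h1 : List.filter (fun q => q.2.contains a) [p] = [p] := by
      simp [hp]
    rw [h1, List.map_append, List.map_cons, List.map_nil, reduceInter_snoc]
    by_cases hk : a ∈ allergensOf data
    · rw [if_pos hk]
      have hne : (data.filter (fun q => q.2.contains a)).map (fun q => PySem.Set.ofList q.1) ≠ [] := by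
        rcases (mem_allergens data a).mp hk with ⟨q, hq, haq⟩
        intro hmapnil
        rw [List.map_eq_nil_iff, List.filter_eq_nil_iff] at hmapnil
        exact hmapnil q hq (by simpa using haq)
      rw [if_neg hne]
    · rw [if_neg hk]
      have hnil : data.filter (fun q => q.2.contains a) = [] := by
        rw [List.filter_eq_nil_iff]
        intro q hq hcq
        exact hk ((mem_allergens data a).mpr ⟨q, hq, by simpa using hcq⟩)
      rw [hnil]
      simp
  · rw [if_neg hp]
    have h1 : List.filter (fun q => q.2.contains a) [p] = [] := by
      simp [hp]
    rw [h1]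
    simp

-- A's inner candidate loop collects exactly the ingredient sets of the foods listing the allergen.
lemma candFold (data : List (List String × List String)) (a : String) :
    data.foldl (fun cs p => if p.2.contains a then cs ++ [PySem.Set.ofList p.1] else cs)
        ([] : List (PySem.Set String))
      = (data.filter (fun p => p.2.contains a)).map (fun p => PySem.Set.ofList p.1) := by
  simpa using PySem.List.foldl_append_if (fun p : List String × List String => p.2.contains a)
    (fun p => PySem.Set.ofList p.1) data []

-- A's second loop overwrites, in key order, every value of the pre-initialised dict.
lemma dict_overwrite (g h : String → List String) (ks : List String) :
    ∀ (d : PySem.Dict String (List String)) (pre : List (String × List String)),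
      ks.Nodup → (∀ a ∈ ks, ∀ q ∈ pre, q.1 ≠ a) →
      d.items = pre ++ ks.map (fun a => (a, h a)) →
      (ks.foldl (fun d a => d.insert a (g a)) d).items = pre ++ ks.map (fun a => (a, g a)) := by
  induction ks with
  | nil => intro d pre _ _ hd; simpa using hd
  | cons a ks ih =>
    intro d pre hnd hpre hd
    have hak : a ∉ ks := (List.nodup_cons.mp hnd).1
    have hnd' := (List.nodup_cons.mp hnd).2
    have hcont : d.contains a = true := by
      rw [PySem.Dict.contains_eq_decide_mem_keys]
      simp only [PySem.Dict.keys, hd, List.map_append, List.map_cons]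
      simp
    have hins : (d.insert a (g a)).items = (pre ++ [(a, g a)]) ++ ks.map (fun x => (x, h x)) := by
      rw [PySem.Dict.items_insert_of_contains d (g a) hcont, hd]
      simp only [List.map_append, List.map_cons, List.map_map]
      have h1 : pre.map (fun p => if (p.1 == a) = true then (a, g a) else p) = pre :=
        map_noop _ _ (fun q hq => by
          simp [show ¬ q.1 = a from hpre a (List.mem_cons_self ..) q hq])
      have h3 : ks.map ((fun p => if (p.1 == a) = true then (a, g a) else p) ∘ fun x => (x, h x))
          = ks.map (fun x => (x, h x)) :=
        List.map_congr_left (fun x hx => by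
          simp [Function.comp, show ¬ x = a from fun e => hak (e ▸ hx)])
      rw [h1, h3]
      simp [List.append_assoc]
    rw [List.foldl_cons]
    have hmain := ih (d.insert a (g a)) (pre ++ [(a, g a)]) hnd' ?_ hins
    · simpa [List.append_assoc] using hmain
    · intro x hx q hq
      rcases List.mem_append.mp hq with h1 | h2
      · exact hpre x (List.mem_cons_of_mem _ hx) q h1
      · have hq' : q = (a, g a) := List.mem_singleton.mp h2
        subst hq'
        intro e
        have e' : a = x := e
        exact hak (by rw [e']; exact hx)

lemma outerA (data : List (List String × List String)) :
    ((allergensOf data).foldl (fun d allergen =>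
        d.insert allergen (reduceInter (data.foldl (fun cs p =>
          if p.2.contains allergen then cs ++ [PySem.Set.ofList p.1] else cs) [])))
      ((allergensOf data).foldl (fun d allergen => d.insert allergen ([] : List String))
        PySem.Dict.empty)).items
    = (allergensOf data).map (fun a => (a, candVal data a)) := by
  have hks : (allergensOf data).Nodup := PySem.Set.nodup_ofList _
  have hd0 : ((allergensOf data).foldl (fun d allergen => d.insert allergen ([] : List String))
      PySem.Dict.empty).items = (allergensOf data).map (fun a => (a, ([] : List String))) := by
    have h := PySem.Dict.items_foldl_insert_fresh (allergensOf data) (fun a => a)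
      (fun _ => ([] : List String)) PySem.Dict.empty (fun a _ => by simp [pysem])
      (by simpa using hks)
    simpa using h
  rw [PySem.List.foldl_congr_mem (allergensOf data) _
    (fun d a => d.insert a (candVal data a)) _
    (fun acc x _ => by rw [candFold]; rfl)]
  have h2 := dict_overwrite (fun a => candVal data a) (fun _ => []) (allergensOf data) _ []
    hks (fun a _ q hq => absurd hq (List.not_mem_nil)) (by simpa using hd0)
  simpa using h2

-- B's inner loop over one food's allergen list, against an arbitrary dict state.
lemma innerFold (S : PySem.Set String) (as : List String) :
    ∀ (ks : List String) (v : String → List String) (d : PySem.Dict String (List String)),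
      ks.Nodup → d.items = ks.map (fun a => (a, v a)) →
      (as.foldl (fun cand allergen =>
          if cand.contains allergen then
            cand.insert allergen (PySem.Set.inter (cand.getD allergen []) S)
          else
            cand.insert allergen S) d).items
        = (PySem.Set.update ks as).map (fun a =>
            (a, if a ∈ as then (if a ∈ ks then PySem.Set.inter (v a) S else S) else v a)) := by
  induction as with
  | nil =>
    intro ks v d _ hd
    simp [PySem.Set.update_nil, hd]
  | cons a as ih =>
    intro ks v d hk hd
    have hkeys : d.keys = ks := by
      simp [PySem.Dict.keys, hd, List.map_map, Function.comp_def]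
    by_cases ha : a ∈ ks
    · have hcont : d.contains a = true := by
        rw [PySem.Dict.contains_eq_decide_mem_keys, hkeys]; simp [ha]
      have hget : d.getD a [] = v a :=
        PySem.Dict.getD_of_mem_items d (by rw [hd]; exact List.mem_map.mpr ⟨a, ha, rfl⟩)
          (by rw [hkeys]; exact hk) []
      have hitems' : (d.insert a (PySem.Set.inter (v a) S)).items
          = ks.map (fun x => (x, if x = a then PySem.Set.inter (v x) S else v x)) := by
        rw [PySem.Dict.items_insert_of_contains d _ hcont, hd, List.map_map]
        apply List.map_congr_left
        intro x hx
        by_cases hxa : x = a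
        · subst hxa; simp [Function.comp]
        · simp [Function.comp, hxa]
      rw [List.foldl_cons]
      simp only [hcont, hget, if_true]
      rw [ih ks (fun x => if x = a then PySem.Set.inter (v x) S else v x) _ hk hitems',
        PySem.Set.update_cons, PySem.Set.add_of_mem ha]
      apply List.map_congr_left
      intro x hx
      by_cases hxa : x = a
      · subst hxa
        by_cases has : x ∈ as <;> simp [has, ha, inter_inter_self]
      · simp [hxa, List.mem_cons]
    · have hcont : d.contains a = false := by
        rw [PySem.Dict.contains_eq_decide_mem_keys, hkeys]; simp [ha]
      have hitems' : (d.insert a S).items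
          = (ks ++ [a]).map (fun x => (x, if x = a then S else v x)) := by
        rw [PySem.Dict.items_insert_of_not_contains d S hcont, hd, List.map_append, List.map_cons,
          List.map_nil]
        congr 1
        · apply List.map_congr_left
          intro x hx
          have hxa : ¬ x = a := fun e => ha (e ▸ hx)
          simp [hxa]
        · simp
      have hk' : (ks ++ [a]).Nodup :=
        hk.append (List.nodup_singleton a)
          (fun x hx hxa => ha (by rw [← List.mem_singleton.mp hxa]; exact hx))
      rw [List.foldl_cons]
      simp only [hcont, Bool.false_eq_true, if_false]
      rw [ih (ks ++ [a]) (fun x => if x = a then S else v x) _ hk' hitems',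
        PySem.Set.update_cons, PySem.Set.add_of_not_mem ha]
      apply List.map_congr_left
      intro x hx
      by_cases hxa : x = a
      · subst hxa
        by_cases has : x ∈ as <;> simp [has, ha, inter_self, List.mem_append]
      · simp [hxa, List.mem_cons, List.mem_append]

lemma outerB (data : List (List String × List String)) :
    ((data.foldl (fun cand p =>
        p.2.foldl (fun cand allergen =>
          if cand.contains allergen then
            cand.insert allergen (PySem.Set.inter (cand.getD allergen []) (PySem.Set.ofList p.1))
          else
            cand.insert allergen (PySem.Set.ofList p.1)) cand)
      PySem.Dict.empty : PySem.Dict String (List String))).items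
    = (allergensOf data).map (fun a => (a, candVal data a)) := by
  induction data using List.reverseRecOn with
  | nil => rfl
  | append_singleton ds p ih =>
    rw [List.foldl_append, List.foldl_cons, List.foldl_nil]
    rw [innerFold (PySem.Set.ofList p.1) p.2 (allergensOf ds) (fun a => candVal ds a) _
      (PySem.Set.nodup_ofList _) ih]
    rw [allergensOf_append]
    apply List.map_congr_left
    intro x hx
    rw [candVal_append]

-- the counting tails agree once the two dicts have the same items
lemma fst_eq_of (flat : List String) (dA dB : PySem.Dict String (List String))
    (h : dA.items = dB.items) :
    ((flat.filter (fun i =>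
        (PySem.Set.diff (PySem.Set.ofList flat) (PySem.Set.ofList dA.values.flatten)).contains i)).map
      (fun _ => (1 : Int))).sum
    = flat.foldl (fun acc i =>
        if (PySem.Set.diff (PySem.Set.ofList flat) (PySem.Set.ofList dB.values.flatten)).contains i
        then acc + 1 else acc) (0 : Int) := by
  have hv : dA.values = dB.values := by
    simp only [PySem.Dict.values]; rw [h]
  rw [hv, PySem.List.foldl_if_add_one, PySem.List.sum_map_const_int, List.countP_eq_length_filter]
  ring

-- ===== VERDICT (by name: the statement is the Claim_ definition above) =====
theorem part_one_spec : Claim_equal_part_one := by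
  intro data _
  unfold Spec_part_one part_one part_one_alt
  simp only [List.flatMap_def]
  have hItems := (outerA data).trans (outerB data).symm
  refine Prod.ext_iff.mpr ⟨?_, ?_⟩
  · exact fst_eq_of _ _ _ hItems
  · exact hItems
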